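-- pv_equiv track=rewrite | github.com/evnewlund9/personal_programs | exercise7/ex7d.py | spaceit
-- ===== SOURCE A (Python) =====
-- def spaceit(istr):
--     if len(istr) == 1:
--         return istr
--     else:
--         if istr[len(istr) - 1] == istr[len(istr) - 2]:
--             return spaceit(istr[:-1]) + " " + istr[-1]
--         else:
--             return spaceit(istr[:-1]) + istr[-1]
-- ===== SOURCE B (Python) =====
-- def spaceit(istr):
--     prev = istr[0]
--     out = [prev]
--     for c in istr[1:]:
--         out.append(' ' + c if c == prev else c)
--         prev = c
--     return ''.join(out)
-- ===== Notes on version B (the rewrite author's own statement) =====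
-- stated objective: faster
-- what changed: Replaces A's back-to-front recursive peel (which rebuilds a slice and concatenates strings at every level, quadratic) with a single forward pass carrying the previous character and joining an accumulator list.
import Mathlib
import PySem

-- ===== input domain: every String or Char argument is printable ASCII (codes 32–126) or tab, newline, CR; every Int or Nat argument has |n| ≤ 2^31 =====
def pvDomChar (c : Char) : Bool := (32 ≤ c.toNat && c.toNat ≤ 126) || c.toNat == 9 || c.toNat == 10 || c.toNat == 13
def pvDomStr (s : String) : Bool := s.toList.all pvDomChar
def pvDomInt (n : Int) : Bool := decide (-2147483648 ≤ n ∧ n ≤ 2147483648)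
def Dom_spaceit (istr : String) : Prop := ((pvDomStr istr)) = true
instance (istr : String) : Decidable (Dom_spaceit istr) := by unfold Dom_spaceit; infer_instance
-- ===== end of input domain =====

-- B replaces A's back-to-front recursive peel by a single forward pass carrying the previous character (idiomatic accumulator loop).


-- ===== PORT A =====
-- A recurses on istr[:-1], comparing the last two characters; on "" Python raises
-- IndexError (istr[-1]), so the [] branch (excluded by Pre_) returns [].
def spaceitA (l : List Char) : List Char :=
  if l.length = 1 then l
  else if l = [] then []   -- Python: IndexError on empty input (outside Pre_)
  else
    spaceitA l.dropLast ++
      (if l.getLast?.getD ' ' = l.dropLast.getLast?.getD ' '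
       then [' ', l.getLast?.getD ' ']
       else [l.getLast?.getD ' '])
termination_by l.length
decreasing_by
  simp only [List.length_dropLast]
  have : l.length ≠ 0 := by simpa using ‹¬ l = []›
  omega

def spaceit (istr : String) : String := String.ofList (spaceitA istr.toList)

-- ===== PORT B =====
-- forward pass: prev = previous character, emit ' '+c when c == prev
def altLoop (prev : Char) : List Char → List Char
  | [] => []
  | c :: rest => (if c = prev then [' ', c] else [c]) ++ altLoop c rest

def spaceit_alt (istr : String) : String :=
  match istr.toList with
  | [] => ""               -- Python B: IndexError on istr[0] (outside Pre_)
  | c :: rest => String.ofList (c :: altLoop c rest)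

-- ===== PRECONDITION & SPEC =====
-- Pre_ excludes only the empty string, on which both A and B raise IndexError.
def Pre_spaceit (istr : String) : Prop := istr ≠ ""
instance (istr : String) : Decidable (Pre_spaceit istr) := by unfold Pre_spaceit; infer_instance
def pvWitness_spaceit : String := "aabbc"

def Spec_spaceit (istr : String) (out : String) : Prop := out = spaceit_alt istr
instance (istr : String) (out : String) : Decidable (Spec_spaceit istr out) := by unfold Spec_spaceit; infer_instance

-- ===== CLAIM (what is proved, stated in full; the proofs are below) =====
def Claim_equal_spaceit : Prop := ∀ (istr : String), Dom_spaceit istr → Pre_spaceit istr → Spec_spaceit istr (spaceit istr)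

-- ===== LEMMAS AND PROOFS =====
theorem altLoop_append (init : List Char) (prev x : Char) :
    altLoop prev (init ++ [x]) =
      altLoop prev init ++
        (if x = (prev :: init).getLast?.getD ' ' then [' ', x] else [x]) := by
  induction init generalizing prev with
  | nil => simp [altLoop]
  | cons d init' ih =>
    simp only [List.cons_append, altLoop, ih d, List.getLast?_cons_cons, List.append_assoc]

theorem spaceitA_eq (c : Char) (rest : List Char) :
    spaceitA (c :: rest) = c :: altLoop c rest := by
  induction rest using List.reverseRecOn with
  | nil => simp [spaceitA, altLoop]
  | append_singleton init x ih =>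
    rw [spaceitA]
    have hlen : (c :: (init ++ [x])).length ≠ 1 := by simp
    have hne : (c :: (init ++ [x])) ≠ [] := by simp
    rw [if_neg hlen, if_neg hne]
    have hdl : (c :: (init ++ [x])).dropLast = c :: init := by
      have : c :: (init ++ [x]) = (c :: init) ++ [x] := by simp
      rw [this, List.dropLast_concat]
    have hgl : (c :: (init ++ [x])).getLast? = some x := by
      simpa using List.getLast?_concat (l := c :: init) (a := x)
    rw [hdl, hgl, ih, altLoop_append]
    simp

-- ===== VERDICT (by name: the statement is the Claim_ definition above) =====
theorem spaceit_spec : Claim_equal_spaceit := by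
  intro istr _ hpre
  unfold Spec_spaceit spaceit spaceit_alt
  cases h : istr.toList with
  | nil =>
    exact absurd (by rw [← istr.ofList_toList, h]) hpre
  | cons c rest => rw [spaceitA_eq]
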